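-- pv_equiv track=rewrite | github.com/b-bblc/bachelor_thesis | src/edu_extractor.py | get_sentence_boundaries
-- ===== SOURCE A (Python) =====
-- from typing import List, Tuple, Dict
--
-- def get_sentence_boundaries(edus: List[str]) -> List[Tuple[int, int]]:
--     """
--     Identify sentence boundaries in a list of EDUs.
--     Groups EDUs that likely belong to the same sentence.
--
--     Args:
--         edus: List of EDU texts
--
--     Returns:
--         List of (start_idx, end_idx) tuples for sentence boundaries
--     """
--     boundaries = []
--     current_start = 0
--
--     for i, edu in enumerate(edus):
--         # Check if EDU ends with sentence-final punctuation
--         if edu.strip().endswith(('.', '!', '?', ':', ';')):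
--             boundaries.append((current_start, i + 1))
--             current_start = i + 1
--
--     # Add remaining EDUs as final sentence if any
--     if current_start < len(edus):
--         boundaries.append((current_start, len(edus)))
--
--     return boundaries
-- ===== SOURCE B (Python) =====
-- def get_sentence_boundaries(edus):
--     """Backward single pass: walk the EDUs from the end, closing each sentence at the
--     current end index and emitting intervals back-to-front, then reverse once.
--     The trailing-remainder special case of the forward version disappears."""
--     if not edus:
--         return []
--     res = []
--     end = len(edus)
--     for i in range(len(edus) - 1, 0, -1):
--         if edus[i - 1].strip().endswith(('.', '!', '?', ':', ';')):
--             res.append((i, end))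
--             end = i
--     res.append((0, end))
--     res.reverse()
--     return res
-- ===== Notes on version B (the rewrite author's own statement) =====
-- stated objective: alternative
-- what changed: B traverses the EDUs backwards with a running sentence END, emitting intervals back-to-front and reversing once, so the forward version's post-loop trailing-remainder conditional disappears; A scans forwards accumulating pairs with a running start.
import Mathlib
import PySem

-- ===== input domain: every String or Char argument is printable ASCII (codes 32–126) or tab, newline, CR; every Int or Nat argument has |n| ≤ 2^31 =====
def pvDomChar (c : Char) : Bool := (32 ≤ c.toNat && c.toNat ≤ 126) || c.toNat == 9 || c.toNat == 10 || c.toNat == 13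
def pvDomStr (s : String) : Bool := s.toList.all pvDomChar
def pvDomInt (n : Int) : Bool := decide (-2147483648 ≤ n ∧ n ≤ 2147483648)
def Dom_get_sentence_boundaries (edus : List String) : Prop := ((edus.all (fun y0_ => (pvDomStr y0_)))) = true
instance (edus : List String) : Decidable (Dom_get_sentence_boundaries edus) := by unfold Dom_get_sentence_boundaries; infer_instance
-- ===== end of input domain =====

-- B walks the EDUs backwards with a running sentence END, emitting the intervals
-- back-to-front and reversing once (no post-loop remainder clause); objective: alternative, same cost.

-- edu.strip().endswith(('.', '!', '?', ':', ';'))  — shared by both Pythons verbatim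
def pvEndsSent (edu : String) : Bool :=
  let s := PySem.Str.strip edu
  PySem.Str.endswith s "." || PySem.Str.endswith s "!" || PySem.Str.endswith s "?" ||
    PySem.Str.endswith s ":" || PySem.Str.endswith s ";"

-- ===== PORT A =====
-- the for-loop of A: state = (boundaries so far, current_start); returns (boundaries, final current_start)
def gsbLoopA : List String → Int → Int → List (Int × Int) × Int
  | [], _, cs => ([], cs)
  | edu :: rest, i, cs =>
    if pvEndsSent edu then
      let r := gsbLoopA rest (i + 1) (i + 1)
      ((cs, i + 1) :: r.1, r.2)
    else gsbLoopA rest (i + 1) cs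

def get_sentence_boundaries (edus : List String) : List (Int × Int) :=
  let r := gsbLoopA edus 0 0
  if r.2 < (edus.length : Int) then r.1 ++ [(r.2, (edus.length : Int))] else r.1

-- ===== PORT B =====
-- the body of B's backward for-loop: state = (current end, reversed result so far)
def gsbStepB (edus : List String) (st : Int × List (Int × Int)) (i : Int) : Int × List (Int × Int) :=
  if pvEndsSent (PySem.List.pyGetD edus (i - 1) "") then (i, st.2 ++ [(i, st.1)]) else st

def get_sentence_boundaries_alt (edus : List String) : List (Int × Int) :=
  if edus = [] then []
  else
    let r := (PySem.List.pyRange ((edus.length : Int) - 1) 0 (-1)).foldl (gsbStepB edus)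
      ((edus.length : Int), [])
    (r.2 ++ [(0, r.1)]).reverse

-- ===== PRECONDITION & SPEC =====
def Spec_get_sentence_boundaries (edus : List String) (out : List (Int × Int)) : Prop := out = get_sentence_boundaries_alt edus
instance (edus : List String) (out : List (Int × Int)) : Decidable (Spec_get_sentence_boundaries edus out) := by unfold Spec_get_sentence_boundaries; infer_instance

-- ===== CLAIM (what is proved, stated in full; the proofs are below) =====
def Claim_equal_get_sentence_boundaries : Prop := ∀ (edus : List String), Dom_get_sentence_boundaries edus → Spec_get_sentence_boundaries edus (get_sentence_boundaries edus)

-- ===== LEMMAS AND PROOFS =====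

-- the cut points (i+1 for each sentence-ending EDU), from enumeration start i
def gsbCuts : List String → Int → List Int
  | [], _ => []
  | e :: r, i => if pvEndsSent e then (i + 1) :: gsbCuts r (i + 1) else gsbCuts r (i + 1)

-- A's loop computes exactly: the consecutive pairs of (cs :: cuts), and the last point as final current_start
lemma gsbLoopA_eq (l : List String) : ∀ (i cs : Int),
    gsbLoopA l i cs =
      ((cs :: gsbCuts l i).zip (gsbCuts l i), (cs :: gsbCuts l i).getLast?.getD 0) := by
  induction l with
  | nil => intro i cs; simp [gsbLoopA, gsbCuts]
  | cons e r ih =>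
    intro i cs
    by_cases h : pvEndsSent e
    · simp only [gsbLoopA, gsbCuts, h, if_pos, ih (i + 1) (i + 1)]
      simp [List.zip]
    · simp [gsbLoopA, gsbCuts, h, ih (i + 1) cs]

lemma gsbCuts_append_singleton (l : List String) (x : String) : ∀ (i : Int),
    gsbCuts (l ++ [x]) i =
      gsbCuts l i ++ (if pvEndsSent x then [i + l.length + 1] else []) := by
  induction l with
  | nil => intro i; by_cases h : pvEndsSent x <;> simp [gsbCuts, h]
  | cons e r ih =>
    intro i
    by_cases h : pvEndsSent e <;>
      simp [gsbCuts, h, ih (i + 1)] <;> ring_nf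

lemma gsbCuts_le (l : List String) : ∀ (i x : Int), x ∈ gsbCuts l i → x ≤ i + l.length := by
  induction l with
  | nil => intro i x h; simp [gsbCuts] at h
  | cons e r ih =>
    intro i x h
    by_cases he : pvEndsSent e <;> simp [gsbCuts, he] at h
    · rcases h with h | h
      · simp; omega
      · have := ih (i + 1) x h; simp at this ⊢; omega
    · have := ih (i + 1) x h; simp at this ⊢; omega

-- appending one point to a nonempty point list appends one interval from its last point
lemma zip_tail_append (p : List Int) (x : Int) (hp : p ≠ []) :
    (p ++ [x]).zip ((p ++ [x]).tail) = p.zip p.tail ++ [(p.getLast?.getD 0, x)] := by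
  induction p with
  | nil => exact absurd rfl hp
  | cons a q ih =>
    rcases q with _ | ⟨b, q'⟩
    · simp
    · have := ih (by simp)
      simp_all [List.zip]

lemma headD_append_append (X : List Int) (y z : Int) :
    ((X ++ [y]) ++ [z]).headD 0 = (X ++ [y]).headD 0 := by
  cases X <;> simp

-- B's backward loop, characterised: with C the cuts among the first k EDUs, it returns
-- (first point of C ++ [e], res ++ the reversed intervals of consecutive points of C ++ [e])
lemma gsbLoopB_eq (edus : List String) : ∀ (k : Nat), k ≤ edus.length →
    ∀ (e : Int) (res : List (Int × Int)),
    (PySem.List.pyRange (k : Int) 0 (-1)).foldl (gsbStepB edus) (e, res) =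
      ((gsbCuts (edus.take k) 0 ++ [e]).headD 0,
       res ++ ((gsbCuts (edus.take k) 0 ++ [e]).zip
                 (gsbCuts (edus.take k) 0 ++ [e]).tail).reverse) := by
  intro k
  induction k with
  | zero => intro _ e res; simp [PySem.List.pyRange_neg_one_eq_nil, gsbCuts]
  | succ k ih =>
    intro hk e res
    have hk' : k < edus.length := hk
    rw [show ((k + 1 : Nat) : Int) = (k : Int) + 1 by push_cast; ring,
        PySem.List.pyRange_neg_one_cons (by positivity)]
    simp only [List.foldl_cons, add_sub_cancel_right]
    have hget : PySem.List.pyGetD edus ((k : Int) + 1 - 1) "" = edus[k] := by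
      rw [show (k : Int) + 1 - 1 = ((k : Nat) : Int) by ring]
      rw [PySem.List.pyGetD_natCast]
      exact List.getD_eq_getElem edus "" hk'
    have htake : edus.take (k + 1) = edus.take k ++ [edus[k]] := by
      rw [List.take_add_one, List.getElem?_eq_getElem hk']; rfl
    have hcuts : gsbCuts (edus.take (k + 1)) 0 =
        gsbCuts (edus.take k) 0 ++
          (if pvEndsSent edus[k] then [(k : Int) + 1] else []) := by
      rw [htake, gsbCuts_append_singleton]
      have : (edus.take k).length = k := by simp [List.length_take]; omega
      rw [this]; norm_num
    by_cases hend : pvEndsSent edus[k]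
    · simp only [gsbStepB, hget, hend, if_pos, ih (le_of_lt hk') ((k : Int) + 1) (res ++ [((k : Int) + 1, e)])]
      rw [hcuts]
      simp only [hend, if_pos, Prod.mk.injEq]
      constructor
      · rw [headD_append_append]
      · rw [List.append_assoc (gsbCuts (edus.take k) 0) [(k : Int) + 1] [e],
            ← List.append_assoc (gsbCuts (edus.take k) 0) [(k : Int) + 1] [e]]
        rw [zip_tail_append (gsbCuts (edus.take k) 0 ++ [(k : Int) + 1]) e (by simp)]
        simp
    · simp only [gsbStepB, hget, hend, if_neg, Bool.false_eq_true, not_false_iff,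
        ih (le_of_lt hk') e res]
      rw [hcuts]
      simp [hend]

lemma zip_cons_head (q : List Int) (z : Int) (hq : q ≠ []) :
    (z :: q).zip ((z :: q).tail) = (z, q.headD 0) :: q.zip q.tail := by
  cases q with
  | nil => exact absurd rfl hq
  | cons a t => simp [List.zip]

-- ===== VERDICT (by name: the statement is the Claim_ definition above) =====
theorem get_sentence_boundaries_spec : Claim_equal_get_sentence_boundaries := by
  intro edus _
  show get_sentence_boundaries edus = get_sentence_boundaries_alt edus
  rcases List.eq_nil_or_concat edus with hnil | ⟨l, x, rfl⟩
  · subst hnil; rfl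
  · simp only [List.concat_eq_append]
    have hne : l ++ [x] ≠ [] := by simp
    have hn : (l ++ [x]).length = l.length + 1 := by simp
    unfold get_sentence_boundaries get_sentence_boundaries_alt
    rw [if_neg hne]
    have hcast : ((((l ++ [x]).length : Nat) : Int) - 1) = ((l.length : Nat) : Int) := by
      rw [hn]; push_cast; ring
    have htake : (l ++ [x]).take l.length = l := by simp
    rw [hcast, gsbLoopB_eq (l ++ [x]) l.length (by simp) (((l ++ [x]).length : Nat) : Int) [],
        htake, gsbLoopA_eq]
    set n : Int := (((l ++ [x]).length : Nat) : Int) with hnI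
    have hnval : n = (l.length : Int) + 1 := by rw [hnI, hn]; push_cast; ring
    set C := gsbCuts l 0 with hC
    have hcuts : gsbCuts (l ++ [x]) 0 = C ++ (if pvEndsSent x then [n] else []) := by
      rw [gsbCuts_append_singleton, ← hC, hnval]
      norm_num
    -- B's value, simplified: (0, head) :: intervals of C ++ [n]
    have hB : ((([] : List (Int × Int)) ++
          ((C ++ [n]).zip (C ++ [n]).tail).reverse ++ [((0 : Int), (C ++ [n]).headD 0)]).reverse)
        = ((0 : Int) :: (C ++ [n])).zip (((0 : Int) :: (C ++ [n])).tail) := by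
      rw [zip_cons_head (C ++ [n]) 0 (by simp)]
      simp
    by_cases hend : pvEndsSent x
    · -- last EDU ends a sentence: cuts = C ++ [n], no remainder is appended by A
      rw [hcuts]; simp only [hend, if_pos]
      have hlast : ((0 : Int) :: (C ++ [n])).getLast?.getD 0 = n := by
        rw [show (0 : Int) :: (C ++ [n]) = ((0 : Int) :: C) ++ [n] from rfl,
            List.getLast?_concat]
        rfl
      rw [hlast, if_neg (lt_irrefl n)]
      rw [hB]
      rfl
    · -- last EDU does not: cuts = C, A appends the remainder (last point, n)
      rw [hcuts]; simp only [hend, Bool.false_eq_true, if_false, List.append_nil]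
      have hlt : ((0 : Int) :: C).getLast?.getD 0 < n := by
        rcases List.eq_nil_or_concat C with hCnil | ⟨C0, c, hCc⟩
        · rw [hCnil]; simp; omega
        · rw [hCc]
          have hc : c ∈ C := by rw [hCc]; simp
          have hcle := gsbCuts_le l 0 c (hC ▸ hc)
          rw [List.concat_eq_append,
              show (0 : Int) :: (C0 ++ [c]) = ((0 : Int) :: C0) ++ [c] from rfl,
              List.getLast?_concat]
          simp only [Option.getD_some]
          omega
      rw [if_pos hlt, hB]
      rw [show (0 : Int) :: (C ++ [n]) = ((0 : Int) :: C) ++ [n] by simp,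
          zip_tail_append ((0 : Int) :: C) n (by simp)]
      rfl
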